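-- pv_equiv track=rewrite | github.com/sanjana3014/greedy_algorithm | Greedy_Approach_to_calculate_total_minimum_price_value.py | calculate_minimum_prices
-- ===== SOURCE A (Python) =====
-- def calculate_minimum_prices(n, reviews):
--     prices = [1] * n  # Initialize all prices to 1
--
--     for i in range(1, n):
--         if reviews[i] > reviews[i - 1]:
--             prices[i] = prices[i - 1] + 1
--
--     for i in range(n - 2, -1, -1):
--         if reviews[i] > reviews[i + 1]:
--             prices[i] = max(prices[i], prices[i + 1] + 1)
--
--     total_price = sum(prices)
--     return total_price
-- ===== SOURCE B (Python) =====
-- def calculate_minimum_prices(n, reviews):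
--     # Classic single-pass O(1)-space candy algorithm: track ascending-run length (up),
--     # descending-run length (down) and the peak's up-value; add each element's final
--     # price to the running total as soon as it is known, retroactively bumping the
--     # current descending run (and the peak when the descent overtakes it).
--     if n <= 0:
--         return 0
--     total = 1
--     up = down = peak = 0
--     for i in range(1, n):
--         if reviews[i] > reviews[i - 1]:
--             up += 1
--             down = 0
--             peak = up
--             total += 1 + up
--         elif reviews[i] == reviews[i - 1]:
--             up = down = peak = 0
--             total += 1
--         else:
--             down += 1
--             up = 0
--             total += down + (1 if down > peak else 0)
--     return total
-- ===== Notes on version B (the rewrite author's own statement) =====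
-- stated objective: alternative
-- what changed: Replaces A's two-pass prices array (forward +1 propagation, backward max-mutation, then sum) with the classic single-pass O(1)-space candy algorithm keeping only up/down/peak run counters and a running total, never allocating a prices list.
import Mathlib
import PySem

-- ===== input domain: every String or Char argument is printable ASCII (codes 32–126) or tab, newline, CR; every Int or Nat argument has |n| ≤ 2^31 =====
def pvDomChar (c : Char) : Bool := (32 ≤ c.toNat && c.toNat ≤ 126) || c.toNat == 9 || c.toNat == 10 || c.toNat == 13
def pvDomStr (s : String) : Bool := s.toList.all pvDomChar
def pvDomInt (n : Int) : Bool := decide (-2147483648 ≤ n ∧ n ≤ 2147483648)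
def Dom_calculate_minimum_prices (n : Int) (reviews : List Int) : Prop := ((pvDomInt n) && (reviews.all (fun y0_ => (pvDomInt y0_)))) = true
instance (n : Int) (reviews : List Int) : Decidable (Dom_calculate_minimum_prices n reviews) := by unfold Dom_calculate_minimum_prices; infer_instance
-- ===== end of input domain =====

-- B replaces A's two-pass prices array (forward +1 propagation, backward max-mutation,
-- then sum) with the classic single-pass O(1)-space candy algorithm: up/down/peak run
-- counters and a running total, never allocating a prices list (objective: alternative).

-- ===== PORT A =====
def calculate_minimum_prices (n : Int) (reviews : List Int) : Int :=
  let prices := List.replicate n.toNat (1 : Int)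
  let prices := (PySem.List.pyRange 1 n 1).foldl
    (fun p i =>
      if PySem.List.pyGetD reviews i 0 > PySem.List.pyGetD reviews (i - 1) 0 then
        p.set i.toNat (PySem.List.pyGetD p (i - 1) 0 + 1)
      else p) prices
  let prices := (PySem.List.pyRange (n - 2) (-1) (-1)).foldl
    (fun p i =>
      if PySem.List.pyGetD reviews i 0 > PySem.List.pyGetD reviews (i + 1) 0 then
        p.set i.toNat (max (PySem.List.pyGetD p i 0) (PySem.List.pyGetD p (i + 1) 0 + 1))
      else p) prices
  prices.sum

-- ===== PORT B =====
-- state = (up, down, peak, total), exactly Source B's four scalars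
def calculate_minimum_prices_alt (n : Int) (reviews : List Int) : Int :=
  if n ≤ 0 then 0
  else
    let st := (PySem.List.pyRange 1 n 1).foldl
      (fun (st : Int × Int × Int × Int) i =>
        if PySem.List.pyGetD reviews i 0 > PySem.List.pyGetD reviews (i - 1) 0 then
          (st.1 + 1, 0, st.1 + 1, st.2.2.2 + 1 + (st.1 + 1))
        else if PySem.List.pyGetD reviews i 0 = PySem.List.pyGetD reviews (i - 1) 0 then
          (0, 0, 0, st.2.2.2 + 1)
        else
          (0, st.2.1 + 1, st.2.2.1,
           st.2.2.2 + (st.2.1 + 1) + (if st.2.1 + 1 > st.2.2.1 then 1 else 0)))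
      (0, 0, 0, 1)
    st.2.2.2

-- ===== PRECONDITION & SPEC =====
-- Pre_ excludes exactly the inputs where Python A raises IndexError: n ≥ 2 with fewer than n reviews.
def Pre_calculate_minimum_prices (n : Int) (reviews : List Int) : Prop :=
  n ≤ 1 ∨ n ≤ (reviews.length : Int)
instance (n : Int) (reviews : List Int) : Decidable (Pre_calculate_minimum_prices n reviews) := by
  unfold Pre_calculate_minimum_prices; infer_instance
def pvWitness_calculate_minimum_prices : Int × List Int := (3, [1, 2, 1])

def Spec_calculate_minimum_prices (n : Int) (reviews : List Int) (out : Int) : Prop := out = calculate_minimum_prices_alt n reviews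
instance (n : Int) (reviews : List Int) (out : Int) : Decidable (Spec_calculate_minimum_prices n reviews out) := by unfold Spec_calculate_minimum_prices; infer_instance

-- ===== CLAIM (what is proved, stated in full; the proofs are below) =====
def Claim_equal_calculate_minimum_prices : Prop := ∀ (n : Int) (reviews : List Int), Dom_calculate_minimum_prices n reviews → Pre_calculate_minimum_prices n reviews → Spec_calculate_minimum_prices n reviews (calculate_minimum_prices n reviews)

-- ===== LEMMAS AND PROOFS =====

-- length of the ascending run of `r` ending at index i
def upF (r : List Int) : Nat → Int
  | 0 => 1
  | i + 1 => if r.getD (i + 1) 0 > r.getD i 0 then upF r i + 1 else 1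

-- length of the descending run of `r` (of length m) starting at index m-1-j
def downG (r : List Int) (m : Nat) : Nat → Int
  | 0 => 1
  | j + 1 => if r.getD (m - 1 - (j + 1)) 0 > r.getD (m - 1 - j) 0 then downG r m j + 1 else 1

def gMax (r : List Int) (m i : Nat) : Int := max (upF r i) (downG r m (m - 1 - i))

def Tsum (r : List Int) (m : Nat) : Nat → Int
  | 0 => 0
  | k + 1 => Tsum r m k + gMax r m k

theorem upF_pos (r : List Int) (i : Nat) : 1 ≤ upF r i := by
  induction i with
  | zero => simp [upF]
  | succ i ih => simp only [upF]; split <;> omega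

theorem downG_pos (r : List Int) (m j : Nat) : 1 ≤ downG r m j := by
  induction j with
  | zero => simp [downG]
  | succ j ih => simp only [downG]; split <;> omega

theorem loopA1 (r : List Int) (m : Nat) (k : Nat) (hk1 : 1 ≤ k) (hkm : k ≤ m) :
    (PySem.List.pyRange 1 (k : Int) 1).foldl
      (fun p i =>
        if PySem.List.pyGetD r i 0 > PySem.List.pyGetD r (i - 1) 0 then
          p.set i.toNat (PySem.List.pyGetD p (i - 1) 0 + 1)
        else p) (List.replicate m (1 : Int))
    = (List.range m).map (fun i => if i < k then upF r i else 1) := by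
  revert hkm
  induction k, hk1 using Nat.le_induction with
  | base =>
    intro _
    rw [show ((1 : Nat) : Int) = 1 by norm_num, PySem.List.pyRange_one_eq_nil le_rfl]
    simp only [List.foldl_nil]
    apply List.ext_getElem
    · simp
    · intro i h1 h2
      simp only [List.getElem_replicate, List.getElem_map, List.getElem_range]
      by_cases h0 : i < 1
      · have : i = 0 := by omega
        subst this
        simp [upF]
      · rw [if_neg h0]
  | succ k hk ih =>
    intro hkm
    rw [show ((k + 1 : Nat) : Int) = (k : Int) + 1 by push_cast; ring,
        PySem.List.pyRange_one_succ_right (by omega : (1 : Int) ≤ (k : Int)),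
        List.foldl_append, ih (by omega), List.foldl_cons, List.foldl_nil]
    rw [show ((k : Int) - 1) = ((k - 1 : Nat) : Int) by omega]
    simp only [PySem.List.pyGetD_natCast, Int.toNat_natCast]
    have hup : upF r k = if r.getD k 0 > r.getD (k - 1) 0 then upF r (k - 1) + 1 else 1 := by
      have hk' : k = (k - 1) + 1 := by omega
      conv_lhs => rw [hk']
      simp only [upF]
      rw [← hk']
    rw [PySem.List.getD_map_range _ m (k - 1) 0 (by omega)]
    rw [if_pos (by omega : k - 1 < k)]
    split_ifs with hgt
    · apply List.ext_getElem
      · simp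
      · intro i h1 h2
        simp only [List.length_set, List.length_map, List.length_range] at h1 h2
        simp only [List.getElem_set, List.getElem_map, List.getElem_range]
        by_cases hik : k = i
        · subst hik
          rw [if_pos rfl, if_pos (by omega : k < k + 1), hup, if_pos hgt]
        · rw [if_neg hik]
          by_cases h3 : i < k
          · rw [if_pos h3, if_pos (by omega : i < k + 1)]
          · rw [if_neg h3, if_neg (by omega : ¬ i < k + 1)]
    · apply List.ext_getElem
      · simp
      · intro i h1 h2
        simp only [List.getElem_map, List.getElem_range]
        by_cases hik : i = k
        · subst hik
          rw [if_neg (by omega : ¬ i < i), if_pos (by omega : i < i + 1), hup, if_neg hgt]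
        · by_cases h3 : i < k
          · rw [if_pos h3, if_pos (by omega : i < k + 1)]
          · rw [if_neg h3, if_neg (by omega : ¬ i < k + 1)]

theorem loopA2 (r : List Int) (m : Nat) (k : Nat) (hk : k ≤ m - 1) (hm : 1 ≤ m) :
    (PySem.List.pyRange ((k : Int) - 1) (-1) (-1)).foldl
      (fun p i =>
        if PySem.List.pyGetD r i 0 > PySem.List.pyGetD r (i + 1) 0 then
          p.set i.toNat (max (PySem.List.pyGetD p i 0) (PySem.List.pyGetD p (i + 1) 0 + 1))
        else p)
      ((List.range m).map (fun i => if k ≤ i then gMax r m i else upF r i))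
    = (List.range m).map (fun i => gMax r m i) := by
  induction k with
  | zero =>
    rw [show ((0 : Nat) : Int) - 1 = -1 by norm_num, PySem.List.pyRange_neg_one_eq_nil le_rfl]
    simp only [List.foldl_nil]
    apply List.map_congr_left
    intro i _
    rw [if_pos (Nat.zero_le i)]
  | succ k ih =>
    rw [show ((k + 1 : Nat) : Int) - 1 = (k : Int) by push_cast; ring,
        PySem.List.pyRange_neg_one_cons (by omega : (-1 : Int) < (k : Int)),
        List.foldl_cons]
    rw [show ((k : Int) + 1) = ((k + 1 : Nat) : Int) by push_cast; ring]
    simp only [PySem.List.pyGetD_natCast, Int.toNat_natCast]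
    rw [PySem.List.getD_map_range _ m k 0 (by omega),
        PySem.List.getD_map_range _ m (k + 1) 0 (by omega)]
    rw [if_neg (by omega : ¬ k + 1 ≤ k), if_pos (le_refl (k + 1))]
    split_ifs with hgt
    · -- descending step at k
      have hu1 : upF r (k + 1) = 1 := by
        simp only [upF]
        rw [if_neg (by omega)]
      have hd : downG r m (m - 1 - k) = downG r m (m - 1 - (k + 1)) + 1 := by
        rw [show m - 1 - k = (m - 1 - (k + 1)) + 1 by omega]
        simp only [downG]
        rw [show m - 1 - (m - 1 - (k + 1) + 1) = k by omega,
            show m - 1 - (m - 1 - (k + 1)) = k + 1 by omega, if_pos hgt]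
      have hdp := downG_pos r m (m - 1 - (k + 1))
      have hval : max (upF r k) (gMax r m (k + 1) + 1) = gMax r m k := by
        unfold gMax
        rw [hu1, hd]
        omega
      rw [hval]
      have hset : ((List.range m).map (fun i => if k + 1 ≤ i then gMax r m i else upF r i)).set k
            (gMax r m k)
          = (List.range m).map (fun i => if k ≤ i then gMax r m i else upF r i) := by
        apply List.ext_getElem
        · simp
        · intro i h1 h2
          simp only [List.length_set, List.length_map, List.length_range] at h1 h2
          simp only [List.getElem_set, List.getElem_map, List.getElem_range]
          by_cases hik : k = i
          · subst hik
            rw [if_pos rfl, if_pos (le_refl k)]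
          · rw [if_neg hik]
            by_cases h3 : k + 1 ≤ i
            · rw [if_pos h3, if_pos (by omega : k ≤ i)]
            · rw [if_neg h3, if_neg (by omega : ¬ k ≤ i)]
      rw [hset, ih (by omega)]
    · -- not descending at k: list unchanged
      have hd1 : downG r m (m - 1 - k) = 1 := by
        rw [show m - 1 - k = (m - 1 - (k + 1)) + 1 by omega]
        simp only [downG]
        rw [show m - 1 - (m - 1 - (k + 1) + 1) = k by omega,
            show m - 1 - (m - 1 - (k + 1)) = k + 1 by omega, if_neg hgt]
      have hrw2 : (List.range m).map (fun i => if k + 1 ≤ i then gMax r m i else upF r i)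
          = (List.range m).map (fun i => if k ≤ i then gMax r m i else upF r i) := by
        apply List.map_congr_left
        intro i _
        by_cases hik : i = k
        · subst hik
          rw [if_neg (by omega : ¬ i + 1 ≤ i), if_pos (le_refl i)]
          unfold gMax
          rw [show m - 1 - i = m - 1 - (i + 1) + 1 by omega] at hd1
          rw [show m - 1 - i = m - 1 - (i + 1) + 1 by omega, hd1]
          have := upF_pos r i
          omega
        · by_cases h3 : k + 1 ≤ i
          · rw [if_pos h3, if_pos (by omega : k ≤ i)]
          · rw [if_neg h3, if_neg (by omega : ¬ k ≤ i)]
      rw [hrw2, ih (by omega)]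

theorem sum_map_g (r : List Int) (m : Nat) (k : Nat) :
    (((List.range k).map (fun i => gMax r m i)).sum) = Tsum r m k := by
  induction k with
  | zero => simp [Tsum]
  | succ k ih => simp [List.range_succ, Tsum, ih]

-- ===== B-side machinery =====

-- length of the strictly descending run of `r` ending at index k (number of descents)
def ddF (r : List Int) : Nat → Nat
  | 0 => 0
  | k + 1 => if r.getD k 0 > r.getD (k + 1) 0 then ddF r k + 1 else 0

-- price contribution of the descending run from i, truncated at index k
def dlen (r : List Int) (k i : Nat) : Int :=
  if h : i < k ∧ r.getD i 0 > r.getD (i + 1) 0 then dlen r k (i + 1) + 1 else 1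
termination_by k - i
decreasing_by omega

-- partial total: prices of indices 0..k as determined by the prefix r[0..k]
def PS (r : List Int) (k : Nat) : Int :=
  ∑ i ∈ Finset.range (k + 1), max (upF r i) (dlen r k i)

theorem ddF_le (r : List Int) (k : Nat) : ddF r k ≤ k := by
  induction k with
  | zero => simp [ddF]
  | succ k ih => simp only [ddF]; split <;> omega

theorem ddF_chain (r : List Int) (k : Nat) :
    ∀ j, k - ddF r k ≤ j → j < k → r.getD j 0 > r.getD (j + 1) 0 := by
  induction k with
  | zero => intro j _ h; omega
  | succ k ih =>
    intro j hj1 hj2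
    simp only [ddF] at hj1
    by_cases h : r.getD k 0 > r.getD (k + 1) 0
    · rw [if_pos h] at hj1
      by_cases hjk : j = k
      · subst hjk; exact h
      · exact ih j (by have := ddF_le r k; omega) (by omega)
    · rw [if_neg h] at hj1; omega

theorem ddF_max (r : List Int) (k : Nat) (h : 0 < k - ddF r k) :
    ¬ r.getD (k - ddF r k - 1) 0 > r.getD (k - ddF r k) 0 := by
  induction k with
  | zero => simp [ddF] at h
  | succ k ih =>
    simp only [ddF] at h ⊢
    by_cases hc : r.getD k 0 > r.getD (k + 1) 0
    · rw [if_pos hc] at h ⊢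
      rw [show k + 1 - (ddF r k + 1) = k - ddF r k by omega] at h ⊢
      exact ih h
    · rw [if_neg hc] at h ⊢
      simpa using hc

theorem dlen_one (r : List Int) (k i : Nat)
    (h : ¬ (i < k ∧ r.getD i 0 > r.getD (i + 1) 0)) : dlen r k i = 1 := by
  rw [dlen, dif_neg h]

theorem dlen_step (r : List Int) (k i : Nat) (h1 : i < k)
    (h2 : r.getD i 0 > r.getD (i + 1) 0) : dlen r k i = dlen r k (i + 1) + 1 := by
  conv_lhs => rw [dlen]
  rw [dif_pos ⟨h1, h2⟩]

theorem dlen_run (r : List Int) (k i : Nat) (hik : i ≤ k)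
    (h : ∀ j, i ≤ j → j < k → r.getD j 0 > r.getD (j + 1) 0) :
    dlen r k i = ((k - i : Nat) : Int) + 1 := by
  by_cases hlt : i < k
  · rw [dlen_step r k i hlt (h i le_rfl hlt),
        dlen_run r k (i + 1) (by omega) (fun j h1 h2 => h j (by omega) h2)]
    omega
  · rw [dlen_one r k i (by omega), show (k - i : Nat) = 0 by omega]
    simp
termination_by k - i

theorem dlen_break (r : List Int) (b i k k' : Nat) (hib : i ≤ b) (hk : b < k) (hk' : b < k')
    (h : ¬ r.getD b 0 > r.getD (b + 1) 0) : dlen r k i = dlen r k' i := by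
  by_cases hlt : i < b
  · by_cases hc : r.getD i 0 > r.getD (i + 1) 0
    · rw [dlen_step r k i (by omega) hc, dlen_step r k' i (by omega) hc,
          dlen_break r b (i + 1) k k' (by omega) hk hk' h]
    · rw [dlen_one r k i (by tauto), dlen_one r k' i (by tauto)]
  · rw [dlen_one r k i (by rw [not_and_or]; right; rw [show i = b by omega]; exact h),
        dlen_one r k' i (by rw [not_and_or]; right; rw [show i = b by omega]; exact h)]
termination_by b - i

theorem dlen_stable (r : List Int) (k i : Nat) (hik : i ≤ k)
    (h : ¬ r.getD k 0 > r.getD (k + 1) 0) : dlen r (k + 1) i = dlen r k i := by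
  by_cases hlt : i < k
  · by_cases hc : r.getD i 0 > r.getD (i + 1) 0
    · rw [dlen_step r (k + 1) i (by omega) hc, dlen_step r k i hlt hc,
          dlen_stable r k (i + 1) (by omega) h]
    · rw [dlen_one r (k + 1) i (by tauto), dlen_one r k i (by tauto)]
  · rw [dlen_one r (k + 1) i (by rw [not_and_or]; right; rw [show i = k by omega]; exact h),
        dlen_one r k i (by omega)]
termination_by k - i

theorem sum_delta (p k : Nat) (c : Int) (hpk : p ≤ k) :
    ∑ i ∈ Finset.range (k + 1), (if i < p then (0 : Int) else if i = p then c else 1)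
      = c + ((k - p : Nat) : Int) := by
  induction k with
  | zero =>
    have : p = 0 := by omega
    subst this
    simp
  | succ k ih =>
    rw [Finset.sum_range_succ]
    by_cases hp : p = k + 1
    · subst hp
      rw [if_neg (by omega), if_pos rfl]
      have : ∑ i ∈ Finset.range (k + 1), (if i < k + 1 then (0 : Int) else if i = k + 1 then c else 1) = 0 := by
        apply Finset.sum_eq_zero
        intro i hi
        rw [Finset.mem_range] at hi
        rw [if_pos hi]
      rw [this]
      simp
    · rw [ih (by omega), if_neg (by omega), if_neg (by omega)]
      omega

theorem PS_succ_flat (r : List Int) (k : Nat) (h : ¬ r.getD k 0 > r.getD (k + 1) 0) :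
    PS r (k + 1) = PS r k + max (upF r (k + 1)) 1 := by
  unfold PS
  rw [Finset.sum_range_succ, dlen_one r (k + 1) (k + 1) (by omega)]
  congr 1
  apply Finset.sum_congr rfl
  intro i hi
  rw [Finset.mem_range] at hi
  rw [dlen_stable r k i (by omega) h]

theorem PS_succ_down (r : List Int) (k : Nat) (h : r.getD k 0 > r.getD (k + 1) 0) :
    PS r (k + 1) = PS r k + (((ddF r k : Nat) : Int) + 1)
      + (if ((ddF r k : Nat) : Int) + 1 > upF r (k - ddF r k) - 1 then 1 else 0) := by
  have hd := ddF_le r k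
  set d := ddF r k with hdd
  set p := k - d with hp
  have hchain : ∀ j, p ≤ j → j < k + 1 → r.getD j 0 > r.getD (j + 1) 0 := by
    intro j h1 h2
    by_cases hjk : j = k
    · subst hjk; exact h
    · exact ddF_chain r k j h1 (by omega)
  set c : Int := if ((d : Nat) : Int) + 1 > upF r p - 1 then 1 else 0 with hc
  unfold PS
  rw [Finset.sum_range_succ]
  have hlast : max (upF r (k + 1)) (dlen r (k + 1) (k + 1)) = 1 := by
    rw [dlen_one r (k + 1) (k + 1) (by omega)]
    have : upF r (k + 1) = 1 := by
      simp only [upF]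
      rw [if_neg (by omega)]
    rw [this]
    simp
  rw [hlast]
  have hpt : ∀ i ∈ Finset.range (k + 1),
      max (upF r i) (dlen r (k + 1) i)
        = max (upF r i) (dlen r k i) + (if i < p then 0 else if i = p then c else 1) := by
    intro i hi
    rw [Finset.mem_range] at hi
    by_cases h1 : i < p
    · rw [if_pos h1]
      have hp1 : 1 ≤ p := by omega
      have hb : ¬ r.getD (p - 1) 0 > r.getD (p - 1 + 1) 0 := by
        rw [show p - 1 + 1 = p by omega]
        exact ddF_max r k (by omega)
      rw [dlen_break r (p - 1) i (k + 1) k (by omega) (by omega) (by omega) hb]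
      omega
    · by_cases h2 : i = p
      · rw [if_neg (by omega), if_pos h2]
        rw [dlen_run r k i (by omega) (fun j hj1 hj2 => hchain j (by omega) (by omega)),
            dlen_run r (k + 1) i (by omega) (fun j hj1 hj2 => hchain j (by omega) hj2)]
        have hu := upF_pos r p
        rw [hc, show (k + 1 - i : Nat) = (k - i) + 1 by omega,
            show (k - i : Nat) = d by omega, h2]
        push_cast
        split_ifs <;> omega
      · rw [if_neg h1, if_neg h2]
        have hpi : p < i := by omega
        have hu1 : upF r i = 1 := by
          have hi1 : i = (i - 1) + 1 := by omega
          have hdesc := hchain (i - 1) (by omega) (by omega)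
          rw [show i - 1 + 1 = i by omega] at hdesc
          conv_lhs => rw [hi1]
          simp only [upF]
          rw [show i - 1 + 1 = i by omega, if_neg (by omega)]
        rw [hu1, dlen_run r k i (by omega) (fun j hj1 hj2 => hchain j (by omega) (by omega)),
            dlen_run r (k + 1) i (by omega) (fun j hj1 hj2 => hchain j (by omega) hj2)]
        have h3 : (0 : Int) ≤ ((k - i : Nat) : Int) := by positivity
        rw [show (k + 1 - i : Nat) = (k - i) + 1 by omega]
        push_cast
        omega
  rw [Finset.sum_congr rfl hpt, Finset.sum_add_distrib, sum_delta p k c (by omega)]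
  rw [hp, show (k - (k - d) : Nat) = d by omega]
  ring

theorem dlen_eq_downG_aux (r : List Int) (m : Nat) (hm : 1 ≤ m) :
    ∀ j, j ≤ m - 1 → dlen r (m - 1) (m - 1 - j) = downG r m j := by
  intro j
  induction j with
  | zero =>
    intro _
    simp only [Nat.sub_zero]
    rw [dlen_one r (m - 1) (m - 1) (by omega)]
    simp [downG]
  | succ j ih =>
    intro hj
    have hi : m - 1 - (j + 1) < m - 1 := by omega
    have hstep : m - 1 - (j + 1) + 1 = m - 1 - j := by omega
    simp only [downG]
    by_cases hc : r.getD (m - 1 - (j + 1)) 0 > r.getD (m - 1 - j) 0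
    · rw [if_pos hc, dlen_step r (m - 1) (m - 1 - (j + 1)) hi (by rw [hstep]; exact hc), hstep, ih (by omega)]
    · rw [if_neg hc, dlen_one r (m - 1) (m - 1 - (j + 1)) (by rw [not_and_or]; right; rw [hstep]; exact hc)]

theorem dlen_eq_downG (r : List Int) (m i : Nat) (hm : 1 ≤ m) (hi : i < m) :
    dlen r (m - 1) i = downG r m (m - 1 - i) := by
  have := dlen_eq_downG_aux r m hm (m - 1 - i) (by omega)
  rw [show m - 1 - (m - 1 - i) = i by omega] at this
  exact this

theorem Tsum_eq_sum (r : List Int) (m k : Nat) :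
    Tsum r m k = ∑ i ∈ Finset.range k, gMax r m i := by
  induction k with
  | zero => simp [Tsum]
  | succ k ih => rw [Finset.sum_range_succ, Tsum, ih]

theorem PS_eq_Tsum (r : List Int) (m : Nat) (hm : 1 ≤ m) :
    PS r (m - 1) = Tsum r m m := by
  rw [Tsum_eq_sum]
  unfold PS
  rw [show m - 1 + 1 = m by omega]
  apply Finset.sum_congr rfl
  intro i hi
  rw [Finset.mem_range] at hi
  unfold gMax
  rw [dlen_eq_downG r m i hm hi]

theorem loopB (r : List Int) (k : Nat) :
    (PySem.List.pyRange 1 ((k : Int) + 1) 1).foldl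
      (fun (st : Int × Int × Int × Int) i =>
        if PySem.List.pyGetD r i 0 > PySem.List.pyGetD r (i - 1) 0 then
          (st.1 + 1, 0, st.1 + 1, st.2.2.2 + 1 + (st.1 + 1))
        else if PySem.List.pyGetD r i 0 = PySem.List.pyGetD r (i - 1) 0 then
          (0, 0, 0, st.2.2.2 + 1)
        else
          (0, st.2.1 + 1, st.2.2.1,
           st.2.2.2 + (st.2.1 + 1) + (if st.2.1 + 1 > st.2.2.1 then 1 else 0)))
      (0, 0, 0, 1)
    = (upF r k - 1, ((ddF r k : Nat) : Int), upF r (k - ddF r k) - 1, PS r k) := by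
  induction k with
  | zero =>
    rw [show ((0 : Nat) : Int) + 1 = 1 by norm_num, PySem.List.pyRange_one_eq_nil le_rfl]
    simp only [List.foldl_nil]
    have hPS : PS r 0 = 1 := by
      unfold PS
      rw [Finset.sum_range_one, dlen_one r 0 0 (by omega)]
      simp [upF]
    rw [hPS]
    simp [upF, ddF]
  | succ k ih =>
    rw [show ((k + 1 : Nat) : Int) + 1 = ((k : Int) + 1) + 1 by push_cast; ring,
        PySem.List.pyRange_one_succ_right (by omega : (1 : Int) ≤ (k : Int) + 1),
        List.foldl_append, ih, List.foldl_cons, List.foldl_nil]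
    rw [show ((k : Int) + 1) = ((k + 1 : Nat) : Int) by push_cast; ring,
        show ((k + 1 : Nat) : Int) - 1 = ((k : Nat) : Int) by push_cast; ring]
    simp only [PySem.List.pyGetD_natCast]
    have hd := ddF_le r k
    by_cases hup : r.getD (k + 1) 0 > r.getD k 0
    · rw [if_pos hup]
      have hu : upF r (k + 1) = upF r k + 1 := by
        simp only [upF]
        rw [if_pos hup]
      have hdd : ddF r (k + 1) = 0 := by
        simp only [ddF]
        rw [if_neg (by omega)]
      have hPS := PS_succ_flat r k (by omega)
      rw [hu] at hPS
      have hu0 := upF_pos r k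
      have hmax : max (upF r k + 1) 1 = upF r k + 1 := by omega
      rw [hmax] at hPS
      rw [hdd]
      simp only [Nat.sub_zero, Nat.cast_zero]
      rw [hu, hPS]
      simp only [Prod.mk.injEq]
      refine ⟨?_, ?_, ?_, ?_⟩ <;> first | trivial | omega
    · rw [if_neg hup]
      by_cases heq : r.getD (k + 1) 0 = r.getD k 0
      · rw [if_pos heq]
        have hu : upF r (k + 1) = 1 := by
          simp only [upF]
          rw [if_neg hup]
        have hdd : ddF r (k + 1) = 0 := by
          simp only [ddF]
          rw [if_neg (by omega)]
        have hPS := PS_succ_flat r k (by omega)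
        rw [hu, show max (1 : Int) 1 = 1 by simp] at hPS
        rw [hdd]
        simp only [Nat.sub_zero, Nat.cast_zero]
        rw [hu, hPS]
        simp only [Prod.mk.injEq]
        refine ⟨?_, ?_, ?_, ?_⟩ <;> trivial
      · rw [if_neg heq]
        have hdown : r.getD k 0 > r.getD (k + 1) 0 := by omega
        have hu : upF r (k + 1) = 1 := by
          simp only [upF]
          rw [if_neg hup]
        have hdd : ddF r (k + 1) = ddF r k + 1 := by
          simp only [ddF]
          rw [if_pos hdown]
        have hPS := PS_succ_down r k hdown
        rw [hu, hdd, hPS, show k + 1 - (ddF r k + 1) = k - ddF r k by omega]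
        push_cast
        congr 1

-- ===== VERDICT (by name: the statement is the Claim_ definition above) =====
theorem calculate_minimum_prices_spec : Claim_equal_calculate_minimum_prices := by
  intro n reviews _ _
  unfold Spec_calculate_minimum_prices calculate_minimum_prices calculate_minimum_prices_alt
  by_cases hn : n ≤ 0
  · rw [PySem.List.pyRange_one_eq_nil (by omega), PySem.List.pyRange_neg_one_eq_nil (by omega)]
    simp [hn, Int.toNat_of_nonpos hn]
  · have hn0 : 0 ≤ n := by omega
    set m := n.toNat with hm
    have hmn : (m : Int) = n := Int.toNat_of_nonneg hn0
    have hm1 : 1 ≤ m := by omega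
    rw [← hmn]
    simp only [show ¬((m : Int) ≤ 0) by omega, ite_false]
    rw [loopA1 reviews m m hm1 le_rfl]
    have e1 : (List.range m).map (fun i => if i < m then upF reviews i else 1)
        = (List.range m).map (fun i => if m - 1 ≤ i then gMax reviews m i else upF reviews i) := by
      apply List.map_congr_left
      intro i hi
      simp only [List.mem_range] at hi
      by_cases h : m - 1 ≤ i
      · rw [if_pos hi, if_pos h]
        have h0 : m - 1 - i = 0 := by omega
        have := upF_pos reviews i
        unfold gMax
        rw [h0]
        simp only [downG]
        omega
      · rw [if_pos hi, if_neg h]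
    rw [e1]
    have e2 : (m : Int) - 2 = ((m - 1 : Nat) : Int) - 1 := by push_cast [hm1]; ring
    rw [e2, loopA2 reviews m (m - 1) le_rfl hm1, sum_map_g]
    rw [show (m : Int) = ((m - 1 : Nat) : Int) + 1 by push_cast [hm1]; ring,
        loopB reviews (m - 1)]
    simp only
    rw [PS_eq_Tsum reviews m hm1]
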